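-- pv_equiv track=rewrite | github.com/Grigorov999/SoftUni-Python | Python_fundamentals/course_chapters_excercises/functions/EX04_10_2_Array_Manipulation_2.py | first_elements
-- ===== SOURCE A (Python) =====
-- def first_elements(nums, count, type):
--     elements = []
--     if type == 'even':
--         for num in nums:
--             if num % 2 == 0 and len(elements) < count:
--                 elements.append(num)
--
--     else:
--         for num in nums:
--             if num % 2 != 0 and len(elements) < count:
--                 elements.append(num)
--
--     return elements
-- ===== SOURCE B (Python) =====
-- def first_elements(nums, count, type):
--     want = 0 if type == 'even' else 1
--
--     def solve(seg, k):
--         # first k elements of seg with parity `want`, by divide and conquer: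
--         # take what the left half yields, then fill the rest from the right half
--         if k <= 0 or not seg:
--             return []
--         if len(seg) == 1:
--             n = seg[0]
--             return [n] if n % 2 == want else []
--         mid = len(seg) // 2
--         left = solve(seg[:mid], k)
--         return left + solve(seg[mid:], k - len(left))
--
--     return solve(nums, count)
-- ===== Notes on version B (the rewrite author's own statement) =====
-- stated objective: alternative
-- what changed: Replaces A's two full-pass loops that append under a length guard by a divide-and-conquer recursion that splits the list in half, takes the first matches from the left half and fills the remaining budget from the right half.
import Mathlib
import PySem

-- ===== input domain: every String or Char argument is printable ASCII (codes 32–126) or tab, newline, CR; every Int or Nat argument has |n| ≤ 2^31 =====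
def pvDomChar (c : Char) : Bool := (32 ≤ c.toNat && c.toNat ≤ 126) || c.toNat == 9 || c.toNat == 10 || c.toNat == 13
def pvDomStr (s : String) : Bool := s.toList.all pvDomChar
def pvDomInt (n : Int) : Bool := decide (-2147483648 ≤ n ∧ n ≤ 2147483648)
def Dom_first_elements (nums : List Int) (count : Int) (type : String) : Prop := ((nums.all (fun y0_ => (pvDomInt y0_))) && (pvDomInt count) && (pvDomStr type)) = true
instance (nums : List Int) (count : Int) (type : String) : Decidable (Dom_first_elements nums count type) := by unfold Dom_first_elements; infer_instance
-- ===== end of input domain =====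

-- B replaces A's two full-pass length-guarded loops by a divide-and-conquer that takes
-- the first parity matches from the left half and fills the remaining budget from the right half; objective: alternative.


-- ===== PORT A =====
def first_elements (nums : List Int) (count : Int) (type : String) : List Int :=
  if type == "even" then
    nums.foldl (fun elements num =>
      if PySem.Int.mod num 2 == 0 && decide ((elements.length : Int) < count) then
        elements ++ [num] else elements) []
  else
    nums.foldl (fun elements num =>
      if PySem.Int.mod num 2 != 0 && decide ((elements.length : Int) < count) then
        elements ++ [num] else elements) []

-- ===== PORT B =====
-- seg[:mid] / seg[mid:] with mid = len(seg)//2 ≥ 0: exactly List.take / List.drop;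
-- seg[0] on the (guarded) nonempty seg is seg.headI — both exact here.
def feSolve (want : Int) (seg : List Int) (k : Int) : List Int :=
  if hk : k ≤ 0 ∨ seg = [] then []
  else if h1 : seg.length = 1 then
    if PySem.Int.mod seg.headI 2 == want then [seg.headI] else []
  else
    let mid := seg.length / 2
    let left := feSolve want (seg.take mid) k
    left ++ feSolve want (seg.drop mid) (k - left.length)
termination_by seg.length
decreasing_by
  · have h0 : seg.length ≠ 0 := by
      simpa [List.length_eq_zero_iff] using (not_or.mp hk).2
    simp only [List.length_take]
    omega
  · have h0 : seg.length ≠ 0 := by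
      simpa [List.length_eq_zero_iff] using (not_or.mp hk).2
    simp only [List.length_drop]
    omega

def first_elements_alt (nums : List Int) (count : Int) (type : String) : List Int :=
  let want : Int := if type == "even" then 0 else 1
  feSolve want nums count

-- ===== PRECONDITION & SPEC =====
def Spec_first_elements (nums : List Int) (count : Int) (type : String) (out : List Int) : Prop := out = first_elements_alt nums count type
instance (nums : List Int) (count : Int) (type : String) (out : List Int) : Decidable (Spec_first_elements nums count type out) := by unfold Spec_first_elements; infer_instance

-- ===== CLAIM (what is proved, stated in full; the proofs are below) =====
def Claim_equal_first_elements : Prop := ∀ (nums : List Int) (count : Int) (type : String), Dom_first_elements nums count type → Spec_first_elements nums count type (first_elements nums count type)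

-- ===== LEMMAS AND PROOFS =====

-- proof-only specification helper: the first-k-matches recursion used to relate both ports
def feTake (want : Int) (nums : List Int) (k : Int) : List Int :=
  if k ≤ 0 then []
  else
    match nums with
    | [] => []
    | n :: ns =>
      if PySem.Int.mod n 2 == want then n :: feTake want ns (k - 1)
      else feTake want ns k

theorem feTake_nonpos (want : Int) (nums : List Int) (k : Int) (h : k ≤ 0) :
    feTake want nums k = [] := by
  unfold feTake; simp [h]

theorem feTake_nil (want : Int) (k : Int) : feTake want [] k = [] := by
  unfold feTake; split <;> rfl

theorem feTake_cons_pos (want n : Int) (ns : List Int) (k : Int)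
    (hk : ¬ k ≤ 0) (hp : (PySem.Int.mod n 2 == want) = true) :
    feTake want (n :: ns) k = n :: feTake want ns (k - 1) := by
  rw [feTake, if_neg hk]; simp only [hp, if_true]

theorem feTake_cons_neg (want n : Int) (ns : List Int) (k : Int)
    (hk : ¬ k ≤ 0) (hp : ¬ (PySem.Int.mod n 2 == want) = true) :
    feTake want (n :: ns) k = feTake want ns k := by
  have hp' : (PySem.Int.mod n 2 == want) = false := eq_false_of_ne_true hp
  rw [feTake, if_neg hk]; simp only [hp', Bool.false_eq_true, if_false]

-- A's guarded accumulation from acc equals acc ++ the first-k-matches of the remaining budget.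
theorem foldl_guard_eq_feTake (want count : Int) (nums acc : List Int) :
    nums.foldl (fun elements num =>
      if (PySem.Int.mod num 2 == want) && decide ((elements.length : Int) < count) then
        elements ++ [num] else elements) acc
    = acc ++ feTake want nums (count - acc.length) := by
  induction nums generalizing acc with
  | nil => simp [feTake]
  | cons n ns ih =>
    simp only [List.foldl_cons]
    by_cases hb : (PySem.Int.mod n 2 == want && decide ((acc.length : Int) < count)) = true
    · rw [if_pos hb, ih (acc ++ [n])]
      simp only [Bool.and_eq_true, decide_eq_true_eq] at hb
      rw [feTake_cons_pos _ _ _ _ (by omega) hb.1]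
      rw [List.append_assoc, List.singleton_append]
      have harith : count - ((acc ++ [n]).length : Int) = count - (acc.length : Int) - 1 := by
        simp only [List.length_append, List.length_cons, List.length_nil]
        push_cast
        omega
      rw [harith]
    · rw [if_neg hb, ih acc]
      simp only [Bool.and_eq_true, decide_eq_true_eq, not_and] at hb
      by_cases hp : (PySem.Int.mod n 2 == want) = true
      · have hk : count - (acc.length : Int) ≤ 0 := by have := hb hp; omega
        rw [feTake_nonpos _ _ _ hk, feTake_nonpos _ _ _ hk]
      · by_cases hk : count - (acc.length : Int) ≤ 0
        · rw [feTake_nonpos _ _ _ hk, feTake_nonpos _ _ _ hk]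
        · rw [feTake_cons_neg _ _ _ _ hk hp]

-- first-k-matches splits over an append: take from the left, fill the rest from the right.
theorem feTake_append (want : Int) (xs ys : List Int) (k : Int) :
    feTake want (xs ++ ys) k
      = feTake want xs k ++ feTake want ys (k - (feTake want xs k).length) := by
  induction xs generalizing k with
  | nil => simp [feTake_nil]
  | cons n xs ih =>
    by_cases hk : k ≤ 0
    · rw [feTake_nonpos _ _ _ hk, feTake_nonpos _ _ _ hk]
      simp [feTake_nonpos _ _ _ hk]
    · by_cases hp : (PySem.Int.mod n 2 == want) = true
      · rw [List.cons_append, feTake_cons_pos _ _ _ _ hk hp, feTake_cons_pos _ _ _ _ hk hp,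
           ih (k - 1)]
        simp only [List.cons_append, List.length_cons]
        have : k - ((feTake want xs (k - 1)).length + 1 : Nat)
             = k - 1 - ((feTake want xs (k - 1)).length : Nat) := by push_cast; omega
        rw [this]
      · rw [List.cons_append, feTake_cons_neg _ _ _ _ hk hp, feTake_cons_neg _ _ _ _ hk hp,
           ih k]

-- the divide-and-conquer recursion computes exactly the first-k-matches
theorem feSolve_eq_feTake (want : Int) (m : Nat) :
    ∀ seg : List Int, seg.length ≤ m → ∀ k : Int, feSolve want seg k = feTake want seg k := by
  induction m with
  | zero =>
    intro seg h k
    have hseg : seg = [] := by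
      cases seg with
      | nil => rfl
      | cons a l => simp at h
    subst hseg
    rw [feSolve, dif_pos (Or.inr rfl), feTake_nil]
  | succ m ih =>
    intro seg hlen k
    rw [feSolve]
    by_cases hk : k ≤ 0 ∨ seg = []
    · rw [dif_pos hk]
      rcases hk with hk | hk
      · rw [feTake_nonpos _ _ _ hk]
      · rw [hk, feTake_nil]
    · rw [dif_neg hk]
      have hknot : ¬ k ≤ 0 := (not_or.mp hk).1
      have hne : seg ≠ [] := (not_or.mp hk).2
      by_cases h1 : seg.length = 1
      · rw [dif_pos h1]
        obtain ⟨n, rest, rfl⟩ := List.exists_cons_of_ne_nil hne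
        have : rest = [] := by simpa [List.length_eq_zero_iff] using h1
        subst this
        by_cases hp : (PySem.Int.mod n 2 == want) = true
        · rw [feTake_cons_pos _ _ _ _ hknot hp, feTake_nil]
          simp only [List.headI_cons, hp, if_true]
        · rw [feTake_cons_neg _ _ _ _ hknot hp, feTake_nil]
          simp only [List.headI_cons, eq_false_of_ne_true hp, Bool.false_eq_true, if_false]
      · rw [dif_neg h1]
        have h0 : seg.length ≠ 0 := by simpa [List.length_eq_zero_iff] using hne
        have hmidlt : seg.length / 2 < seg.length := by omega
        have htlen : (seg.take (seg.length / 2)).length ≤ m := by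
          simp only [List.length_take]; omega
        have hdlen : (seg.drop (seg.length / 2)).length ≤ m := by
          simp only [List.length_drop]; omega
        show feSolve want (seg.take (seg.length / 2)) k
              ++ feSolve want (seg.drop (seg.length / 2))
                   (k - ((feSolve want (seg.take (seg.length / 2)) k).length : Int))
            = feTake want seg k
        rw [ih _ htlen, ih _ hdlen]
        conv_rhs => rw [← List.take_append_drop (seg.length / 2) seg,
          feTake_append]

-- Python's % with divisor 2 yields 0 or 1, so 'n % 2 != 0' is 'n % 2 == 1'.
theorem mod_two_ne_zero (n : Int) : (PySem.Int.mod n 2 != 0) = (PySem.Int.mod n 2 == 1) := by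
  have h0 := PySem.Int.mod_nonneg n (b := 2) (by omega)
  have h1 := PySem.Int.mod_lt n (b := 2) (by omega)
  have h : PySem.Int.mod n 2 = 0 ∨ PySem.Int.mod n 2 = 1 := by omega
  rcases h with h | h <;> rw [h] <;> decide

-- ===== VERDICT (by name: the statement is the Claim_ definition above) =====
theorem first_elements_spec : Claim_equal_first_elements := by
  intro nums count type _
  unfold Spec_first_elements first_elements first_elements_alt
  by_cases ht : type == "even"
  · simp only [ht, if_true]
    rw [feSolve_eq_feTake 0 nums.length nums le_rfl count]
    have h := foldl_guard_eq_feTake 0 count nums []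
    simpa using h
  · simp only [ht, Bool.false_eq_true, if_false]
    rw [feSolve_eq_feTake 1 nums.length nums le_rfl count]
    have heq : (fun (elements : List Int) num =>
        if PySem.Int.mod num 2 != 0 && decide ((elements.length : Int) < count) then
          elements ++ [num] else elements)
      = (fun (elements : List Int) num =>
        if (PySem.Int.mod num 2 == 1) && decide ((elements.length : Int) < count) then
          elements ++ [num] else elements) := by
      funext elements num; rw [mod_two_ne_zero]
    rw [heq]
    have h := foldl_guard_eq_feTake 1 count nums []
    simpa using h
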